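-- pv_equiv track=rewrite | github.com/yannikkellerde/ykutil | ykutil/python.py | naive_regex_escape
-- ===== SOURCE A (Python) =====
-- def naive_regex_escape(some_str: str) -> str:
--     # This method should be already implemented in some standard python module,
--     # but I can not find it. (re.escape does not seem to do what I want)
--     r"""
--     >>> naive_regex_escape(r"Peter ({Person}) is eating [3 or 4] sandwiches.")
--     'Peter \\({Person}\\) is eating \\[3 or 4\\] sandwiches\\.'
--     """
--     # This metachar map sounds stupid, but python syntax is weird here
--     metachar_map = {
--         r"(": r"\(",
--         r")": r"\)",
--         r"]": r"\]",
--         r"[": r"\[",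
--         r"^": r"\^",
--         r"$": r"\$",
--         r"+": r"\+",
--         r"*": r"\*",
--         r".": r"\.",
--         r"?": r"\?",
--     }
--     for key, value in metachar_map.items():
--         some_str = some_str.replace(key, value)
--     return some_str
-- ===== SOURCE B (Python) =====
-- METACHARS = {"(", ")", "]", "[", "^", "$", "+", "*", ".", "?"}
--
-- def naive_regex_escape(some_str: str) -> str:
--     # Single pass over the string: prepend a backslash to each metacharacter.
--     return "".join("\\" + c if c in METACHARS else c for c in some_str)
-- ===== Notes on version B (the rewrite author's own statement) =====
-- stated objective: idiomatic
-- what changed: Replaces ten sequential str.replace passes (one per metacharacter) with a single pass over the input that joins '\'+c or c per character.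
import Mathlib
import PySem

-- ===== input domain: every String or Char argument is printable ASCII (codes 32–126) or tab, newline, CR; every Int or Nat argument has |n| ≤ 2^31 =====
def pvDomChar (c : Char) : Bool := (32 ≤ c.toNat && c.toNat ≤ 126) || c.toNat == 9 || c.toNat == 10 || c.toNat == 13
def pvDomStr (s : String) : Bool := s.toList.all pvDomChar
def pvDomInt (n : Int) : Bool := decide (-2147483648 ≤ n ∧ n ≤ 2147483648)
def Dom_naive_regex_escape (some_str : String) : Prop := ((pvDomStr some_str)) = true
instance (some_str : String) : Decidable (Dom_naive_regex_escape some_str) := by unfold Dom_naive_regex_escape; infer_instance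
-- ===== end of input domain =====

-- B replaces A's ten sequential str.replace passes by one pass over the string (idiomatic single pass).

-- ===== PORT A =====
-- the dict literal (an association list in insertion order)
def pvMetacharMap : List (String × String) :=
  [("(", "\\("), (")", "\\)"), ("]", "\\]"), ("[", "\\["), ("^", "\\^"),
   ("$", "\\$"), ("+", "\\+"), ("*", "\\*"), (".", "\\."), ("?", "\\?")]

def naive_regex_escape (some_str : String) : String :=
  pvMetacharMap.foldl (fun s kv => PySem.Str.replace s kv.1 kv.2) some_str

-- ===== PORT B =====
def pvMetachars : List Char := ['(', ')', ']', '[', '^', '$', '+', '*', '.', '?']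

def naive_regex_escape_alt (some_str : String) : String :=
  String.ofList (some_str.toList.flatMap (fun c => if c ∈ pvMetachars then ['\\', c] else [c]))

-- ===== PRECONDITION & SPEC =====
def Spec_naive_regex_escape (some_str : String) (out : String) : Prop := out = naive_regex_escape_alt some_str
instance (some_str : String) (out : String) : Decidable (Spec_naive_regex_escape some_str out) := by unfold Spec_naive_regex_escape; infer_instance

-- ===== CLAIM (what is proved, stated in full; the proofs are below) =====
def Claim_equal_naive_regex_escape : Prop := ∀ (some_str : String), Dom_naive_regex_escape some_str → Spec_naive_regex_escape some_str (naive_regex_escape some_str)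

-- ===== LEMMAS AND PROOFS =====

-- single-character pattern: Python's replace is a per-character map
theorem replace_go_single (k : Char) (nw : List Char) :
    ∀ (l acc : List Char) (fuel : Nat), l.length ≤ fuel →
      PySem.Chars.replace.go [k] nw fuel l acc
        = acc.reverse ++ l.flatMap (fun c => if c = k then nw else [c]) := by
  intro l
  induction l with
  | nil =>
      intro acc fuel _
      cases fuel <;> simp [PySem.Chars.replace.go]
  | cons c t ih =>
      intro acc fuel hf
      cases fuel with
      | zero => simp at hf
      | succ fuel =>
          rw [PySem.Chars.replace.go]
          by_cases hc : c = k
          · subst hc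
            simp only [List.isPrefixOf, Bool.and_true, beq_self_eq_true,
              if_pos]
            simp only [List.length_cons, List.length_nil, List.drop_succ_cons, List.drop_zero]
            rw [ih _ fuel (by simpa using Nat.le_of_succ_le_succ hf)]
            simp
          · have hpre : List.isPrefixOf [k] (c :: t) = false := by
              simp [List.isPrefixOf]
              intro h; exact absurd h.symm hc
            rw [hpre]
            simp only [Bool.false_eq_true, if_false]
            rw [ih _ fuel (by simpa using Nat.le_of_succ_le_succ hf)]
            simp [hc]

theorem replace_single (k : Char) (nw l : List Char) :
    PySem.Chars.replace l [k] nw = l.flatMap (fun c => if c = k then nw else [c]) := by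
  rw [PySem.Chars.replace]
  simp only [List.isEmpty_cons, Bool.false_eq_true, if_false]
  simpa using replace_go_single k nw l [] l.length (le_refl _)

-- one escape step on a list, and the fold of steps over a key list
def pvStep (k : Char) (l : List Char) : List Char :=
  l.flatMap (fun c => if c = k then ['\\', k] else [c])

def pvFold (ks : List Char) (l : List Char) : List Char :=
  ks.foldl (fun s k => pvStep k s) l

theorem pvFold_append (ks : List Char) (l₁ l₂ : List Char) :
    pvFold ks (l₁ ++ l₂) = pvFold ks l₁ ++ pvFold ks l₂ := by
  induction ks generalizing l₁ l₂ with
  | nil => rfl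
  | cons k ks ih => simp only [pvFold, List.foldl_cons, pvStep, List.flatMap_append] at *; exact ih _ _

theorem pvFold_nil (ks : List Char) : pvFold ks [] = [] := by
  induction ks with
  | nil => rfl
  | cons k ks ih => simpa [pvFold, pvStep] using ih

theorem pvFold_single_notmem (ks : List Char) (c : Char) (hc : c ∉ ks) :
    pvFold ks [c] = [c] := by
  induction ks with
  | nil => rfl
  | cons k ks ih =>
      have hck : c ≠ k := fun h => hc (h ▸ List.mem_cons_self)
      have hc' : c ∉ ks := fun h => hc (List.mem_cons_of_mem _ h)
      have h1 : pvStep k [c] = [c] := by simp [pvStep, hck]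
      have : pvFold (k :: ks) [c] = pvFold ks [c] := by simp [pvFold, h1]
      rw [this, ih hc']

theorem pvFold_single (ks : List Char) (hnd : ks.Nodup) (hb : '\\' ∉ ks) (c : Char) :
    pvFold ks [c] = if c ∈ ks then ['\\', c] else [c] := by
  induction ks with
  | nil => rfl
  | cons k ks ih =>
      have hnd' := (List.nodup_cons.mp hnd).2
      have hknot := (List.nodup_cons.mp hnd).1
      have hb' : '\\' ∉ ks := fun h => hb (List.mem_cons_of_mem _ h)
      by_cases hc : c = k
      · subst hc
        have h1 : pvStep c [c] = ['\\', c] := by simp [pvStep]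
        have h2 : pvFold (c :: ks) [c] = pvFold ks ['\\', c] := by simp [pvFold, h1]
        rw [h2, show (['\\', c] : List Char) = ['\\'] ++ [c] from rfl, pvFold_append,
          pvFold_single_notmem ks '\\' hb', pvFold_single_notmem ks c hknot]
        simp
      · have h1 : pvStep k [c] = [c] := by simp [pvStep, hc]
        have h2 : pvFold (k :: ks) [c] = pvFold ks [c] := by simp [pvFold, h1]
        rw [h2, ih hnd' hb']
        simp [hc]

theorem pvFold_eq (ks : List Char) (hnd : ks.Nodup) (hb : '\\' ∉ ks) (l : List Char) :
    pvFold ks l = l.flatMap (fun c => if c ∈ ks then ['\\', c] else [c]) := by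
  induction l with
  | nil => simpa using pvFold_nil ks
  | cons c t ih =>
      rw [show (c :: t : List Char) = [c] ++ t from rfl, pvFold_append,
        pvFold_single ks hnd hb c, ih]
      simp [List.flatMap_cons]

theorem A_toList (s : String) :
    (naive_regex_escape s).toList = pvFold pvMetachars s.toList := by
  simp only [naive_regex_escape, pvMetacharMap, List.foldl_cons, List.foldl_nil,
    PySem.Str.toList_replace,
    show "(".toList = ['('] from rfl, show "\\(".toList = ['\\', '('] from rfl,
    show ")".toList = [')'] from rfl, show "\\)".toList = ['\\', ')'] from rfl,
    show "]".toList = [']'] from rfl, show "\\]".toList = ['\\', ']'] from rfl,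
    show "[".toList = ['['] from rfl, show "\\[".toList = ['\\', '['] from rfl,
    show "^".toList = ['^'] from rfl, show "\\^".toList = ['\\', '^'] from rfl,
    show "$".toList = ['$'] from rfl, show "\\$".toList = ['\\', '$'] from rfl,
    show "+".toList = ['+'] from rfl, show "\\+".toList = ['\\', '+'] from rfl,
    show "*".toList = ['*'] from rfl, show "\\*".toList = ['\\', '*'] from rfl,
    show ".".toList = ['.'] from rfl, show "\\.".toList = ['\\', '.'] from rfl,
    show "?".toList = ['?'] from rfl, show "\\?".toList = ['\\', '?'] from rfl,
    replace_single, pvFold, pvMetachars, pvStep]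

-- ===== VERDICT (by name: the statement is the Claim_ definition above) =====
theorem naive_regex_escape_spec : Claim_equal_naive_regex_escape := by
  intro s _
  show naive_regex_escape s = naive_regex_escape_alt s
  apply String.toList_inj.mp
  rw [A_toList, pvFold_eq pvMetachars (by decide) (by decide)]
  simp [naive_regex_escape_alt]
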